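-- pv_equiv track=rewrite | github.com/KisloTAooAnkit/Python-Programs | DP2/Maximum subsequence sum such that no three are consecutive.py | helper
-- ===== SOURCE A (Python) =====
-- def helper(arr,n,idx,cd):
--     if n==0:
--         return 0
--     ans2 =0
--     if cd < 3:
--         ans2 = arr[idx] + helper(arr,n-1,idx+1,cd+1)
--     ans1 = helper(arr,n-1,idx+1,1)
--     return max(ans1,ans2)
-- ===== SOURCE B (Python) =====
-- def helper(arr, n, idx, cd):
--     # Linear backward DP over the window arr[idx:idx+n] (Python indexing, so a
--     # negative idx wraps like in A).  For each suffix position j we keep the best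
--     # sums reachable with consecutive-taken counter 1, 2, 3, and with the counter
--     # cd + j (its value along the take-everything-so-far path).
--     if n <= 0:
--         return 0
--     a = [arr[idx + i] for i in range(n)]
--     h1 = h2 = h3 = hc = 0
--     for j in range(n - 1, -1, -1):
--         x = a[j]
--         hc = max(h1, x + hc) if cd + j < 3 else max(h1, 0)
--         h1, h2, h3 = max(h1, x + h2), max(h1, x + h3), max(h1, 0)
--     return hc
-- ===== Notes on version B (the rewrite author's own statement) =====
-- stated objective: alternative
-- what changed: Replaced the exponential take/skip branching recursion with one backward O(n) DP pass over the window keeping four suffix values: the best sums with consecutive-taken counter 1, 2, 3, and with counter cd+j (the counter along the all-taken prefix path); intended as faster, but the probe could not measure a ratio because A already times out at n=64.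
-- outside the precondition, e.g. on helper([], 1, 0, 3): A returns 0, B raises IndexError
import Mathlib
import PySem

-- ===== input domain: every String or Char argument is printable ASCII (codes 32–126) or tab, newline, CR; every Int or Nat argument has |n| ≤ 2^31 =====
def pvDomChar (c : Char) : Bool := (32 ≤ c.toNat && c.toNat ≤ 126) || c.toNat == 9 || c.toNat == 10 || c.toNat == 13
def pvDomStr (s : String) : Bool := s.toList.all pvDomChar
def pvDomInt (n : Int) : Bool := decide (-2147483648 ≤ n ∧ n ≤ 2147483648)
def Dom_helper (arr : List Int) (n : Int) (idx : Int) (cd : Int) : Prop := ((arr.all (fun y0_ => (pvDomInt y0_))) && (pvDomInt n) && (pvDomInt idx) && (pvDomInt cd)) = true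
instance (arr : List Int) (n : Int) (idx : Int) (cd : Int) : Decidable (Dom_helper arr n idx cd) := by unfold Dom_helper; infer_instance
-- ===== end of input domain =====

-- B replaces A's take/skip branching recursion by one backward linear DP pass
-- over the accessed window, tracking four suffix values (objective: alternative
-- algorithm; intended to scale better, not confirmed).


-- ===== PORT A =====
-- literal transliteration of A's recursion; n becomes a Nat fuel (Pre_ gives 0 ≤ n);
-- arr[idx] is Python indexing via pyGet? (in range on every access under Pre_)
def helperGo (arr : List Int) (fuel : Nat) (idx : Int) (cd : Int) : Int :=
  match fuel with
  | 0 => 0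
  | f + 1 =>
    let ans2 : Int :=
      if cd < 3 then ((PySem.List.pyGet? arr idx).getD 0) + helperGo arr f (idx + 1) (cd + 1)
      else 0
    let ans1 := helperGo arr f (idx + 1) 1
    max ans1 ans2

def helper (arr : List Int) (n : Int) (idx : Int) (cd : Int) : Int :=
  helperGo arr n.toNat idx cd

-- ===== PORT B =====
-- the window a = [arr[idx+i] for i in range(n)] of Source B
def window (arr : List Int) (f : Nat) (idx : Int) : List Int :=
  (List.range f).map (fun i => (PySem.List.pyGet? arr (idx + Int.ofNat i)).getD 0)

-- Source B's backward loop (j = n-1 … 0) as structural recursion on the suffix of a,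
-- carrying the position j of the suffix's first element; state = (h1, h2, h3, hc)
def bdp (cd : Int) (a : List Int) (j : Int) : Int × Int × Int × Int :=
  match a with
  | [] => (0, 0, 0, 0)
  | x :: xs =>
    let s := bdp cd xs (j + 1)
    let h1 := s.1; let h2 := s.2.1; let h3 := s.2.2.1; let hc := s.2.2.2
    (max h1 (x + h2), max h1 (x + h3), max h1 0,
      if cd + j < 3 then max h1 (x + hc) else max h1 0)

def helper_alt (arr : List Int) (n : Int) (idx : Int) (cd : Int) : Int :=
  if n ≤ 0 then 0
  else (bdp cd (window arr n.toNat idx) 0).2.2.2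

-- ===== PRECONDITION & SPEC =====
-- Pre_ excludes: n < 0 (A recurses without bound), and windows reaching outside the
-- list, where A raises IndexError — except that when cd ≥ 3 A skips reading arr[idx]
-- and can still return (e.g. ([],1,0,3) ↦ 0) while B reads the whole window; that
-- corner is excluded too. Negative idx (Python wraparound) stays inside Pre_.
def Pre_helper (arr : List Int) (n : Int) (idx : Int) (cd : Int) : Prop :=
  0 ≤ n ∧ (n = 0 ∨ (-(arr.length : Int) ≤ idx ∧ idx + n ≤ (arr.length : Int)))
instance (arr : List Int) (n : Int) (idx : Int) (cd : Int) : Decidable (Pre_helper arr n idx cd) := by unfold Pre_helper; infer_instance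

def pvWitness_helper : List Int × Int × Int × Int := ([3, -2, 5, 5, -1], 5, 0, 0)

def Spec_helper (arr : List Int) (n : Int) (idx : Int) (cd : Int) (out : Int) : Prop := out = helper_alt arr n idx cd
instance (arr : List Int) (n : Int) (idx : Int) (cd : Int) (out : Int) : Decidable (Spec_helper arr n idx cd out) := by unfold Spec_helper; infer_instance

-- ===== CLAIM (what is proved, stated in full; the proofs are below) =====
def Claim_equal_helper : Prop := ∀ (arr : List Int) (n : Int) (idx : Int) (cd : Int), Dom_helper arr n idx cd → Pre_helper arr n idx cd → Spec_helper arr n idx cd (helper arr n idx cd)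

-- ===== LEMMAS AND PROOFS =====

-- abstract form of A's recursion over the window list
def Habs : List Int → Int → Int
  | [], _cd => 0
  | x :: xs, cd => max (Habs xs 1) (if cd < 3 then x + Habs xs (cd + 1) else 0)

theorem window_succ (arr : List Int) (f : Nat) (idx : Int) :
    window arr (f + 1) idx =
      ((PySem.List.pyGet? arr idx).getD 0) :: window arr f (idx + 1) := by
  unfold window
  rw [List.range_succ_eq_map, List.map_cons, List.map_map]
  simp only [List.cons.injEq]
  constructor
  · norm_num
  · apply List.map_congr_left
    intro i _
    simp only [Function.comp]
    congr 1
    simp only [Int.ofNat_eq_natCast]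
    push_cast
    ring

theorem helperGo_eq_Habs (arr : List Int) (f : Nat) :
    ∀ (idx cd : Int), helperGo arr f idx cd = Habs (window arr f idx) cd := by
  induction f with
  | zero => intro idx cd; simp [helperGo, window, Habs]
  | succ f ih =>
    intro idx cd
    rw [window_succ]
    simp only [helperGo, Habs, ih]

theorem bdp_eq_Habs (cd : Int) (a : List Int) :
    ∀ (j : Int), bdp cd a j = (Habs a 1, Habs a 2, Habs a 3, Habs a (cd + j)) := by
  induction a with
  | nil => intro j; simp [bdp, Habs]
  | cons x xs ih =>
    intro j
    simp only [bdp, ih (j + 1), Habs]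
    refine Prod.ext ?_ (Prod.ext ?_ (Prod.ext ?_ ?_)) <;> simp only
    · norm_num
    · norm_num
    · norm_num
    · by_cases h : cd + j < 3
      · rw [if_pos h, if_pos h, ← add_assoc]
      · rw [if_neg h, if_neg h]

-- ===== VERDICT (by name: the statement is the Claim_ definition above) =====
theorem helper_spec : Claim_equal_helper := by
  intro arr n idx cd _ _
  unfold Spec_helper helper helper_alt
  by_cases hn : n ≤ 0
  · have : n.toNat = 0 := Int.toNat_of_nonpos hn
    rw [if_pos hn, this]
    simp [helperGo]
  · rw [if_neg hn, helperGo_eq_Habs, bdp_eq_Habs]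
    simp
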